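-- pv_equiv track=rewrite | github.com/robertgrassian/advent_of_code_2023 | day7/7b.py | secondOrderCompare
-- ===== SOURCE A (Python) =====
-- CARD_VALUES = {"J":0, "2":1, "3":2, "4":3, "5":4, "6":5, "7":6, "8":7, "9":8, "T":9, "Q":10, "K":11, "A":12}
--
-- def secondOrderCompare(cardHand1, cardHand2):
-- 	# compare each letter
-- 	handSize = len(cardHand1)
-- 	for i in range(handSize):
-- 		card1 = cardHand1[i]
-- 		card2 = cardHand2[i]
-- 		comped = cardCompare(card1, card2)
-- 		if comped != 0:
-- 			return comped
-- 		else: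
-- 			# same, so move on
-- 			if handSize == 1:
-- 				return 0
-- 			# TODO bug here because its expecting cards
-- 			return secondOrderCompare(cardHand1[1:], cardHand2[1:])
--
-- def cardCompare(card1, card2):
-- 	if CARD_VALUES[card1] < CARD_VALUES[card2]:
-- 		return -1
-- 	elif CARD_VALUES[card1] > CARD_VALUES[card2]:
-- 		return 1
-- 	else:
-- 		return 0
-- ===== SOURCE B (Python) =====
-- CARD_VALUES = {"J":0, "2":1, "3":2, "4":3, "5":4, "6":5, "7":6, "8":7, "9":8, "T":9, "Q":10, "K":11, "A":12}
--
-- def secondOrderCompare(cardHand1, cardHand2):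
-- 	# single index loop instead of recursion over slices
-- 	for i in range(len(cardHand1)):
-- 		d = CARD_VALUES[cardHand1[i]] - CARD_VALUES[cardHand2[i]]
-- 		if d:
-- 			return -1 if d < 0 else 1
-- 	return 0
-- ===== Notes on version B (the rewrite author's own statement) =====
-- stated objective: simpler
-- what changed: Replaces the recursion-over-slices (which rebuilds both hands with [1:] at every step and carries a special handSize==1 case) by a single flat index loop that subtracts card values and returns the sign of the first nonzero difference, with a plain 'return 0' after the loop.
-- outside the precondition, e.g. on secondOrderCompare('', ''): A returns None, B returns 0
import Mathlib
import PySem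

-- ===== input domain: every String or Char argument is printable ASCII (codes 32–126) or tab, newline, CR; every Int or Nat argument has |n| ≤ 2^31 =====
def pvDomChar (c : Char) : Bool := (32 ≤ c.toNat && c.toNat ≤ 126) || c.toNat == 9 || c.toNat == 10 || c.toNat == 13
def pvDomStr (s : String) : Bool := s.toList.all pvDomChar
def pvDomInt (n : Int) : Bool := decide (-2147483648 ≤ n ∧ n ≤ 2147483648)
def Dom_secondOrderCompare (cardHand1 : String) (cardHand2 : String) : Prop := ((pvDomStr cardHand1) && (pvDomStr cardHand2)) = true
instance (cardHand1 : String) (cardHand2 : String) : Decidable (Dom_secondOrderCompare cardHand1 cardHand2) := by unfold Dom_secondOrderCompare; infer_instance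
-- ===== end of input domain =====

-- B replaces A's recursion over [1:]-slices by a single index loop over value differences (objective: simpler).

-- ===== PORT A =====
def CARD_VALUES : PySem.Dict Char Int :=
  PySem.Dict.ofList [('J',0),('2',1),('3',2),('4',3),('5',4),('6',5),('7',6),('8',7),('9',8),('T',9),('Q',10),('K',11),('A',12)]

-- CARD_VALUES[card] raising KeyError is modelled as none.
def cardCompare (card1 card2 : Char) : Option Int :=
  match CARD_VALUES.get? card1, CARD_VALUES.get? card2 with
  | some v1, some v2 => some (if v1 < v2 then (-1 : Int) else if v2 < v1 then 1 else 0)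
  | _, _ => none

-- A's loop body always returns during iteration i = 0 (every branch of it returns), so A is exactly
-- this recursion on cardHand1[1:], cardHand2[1:]; none = A raises (IndexError / KeyError) or falls
-- off the empty range(0) loop and returns None (empty cardHand1).
def secondOrderCompareAux : List Char → List Char → Option Int
  | [], _ => none                  -- range(0) is empty: A returns None, not an int
  | _ :: _, [] => none             -- cardHand2[0] : IndexError
  | c1 :: t1, c2 :: t2 =>
    match cardCompare c1 c2 with
    | none => none                 -- KeyError propagates
    | some comped =>
      if comped ≠ 0 then some comped
      else if t1.isEmpty then some 0           -- handSize == 1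
      else secondOrderCompareAux t1 t2         -- secondOrderCompare(cardHand1[1:], cardHand2[1:])

def secondOrderCompare (cardHand1 : String) (cardHand2 : String) : Int :=
  (secondOrderCompareAux cardHand1.toList cardHand2.toList).getD 0   -- Pre_ guarantees the some case

-- ===== PORT B =====
-- Source B's index loop; i comes from range(len(cardHand1)), so it is a nonnegative in-range index and
-- cardHand1[i] is getElem; cardHand2[i] may be out of range (IndexError) → getElem?; CARD_VALUES
-- lookups may raise KeyError → get?; none = B raises.
def secondOrderCompareAltGo (l1 l2 : List Char) (i : Nat) : Option Int :=
  if h : i < l1.length then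
    match l2[i]? with
    | none => none
    | some c2 =>
      match CARD_VALUES.get? l1[i], CARD_VALUES.get? c2 with
      | some v1, some v2 =>
        let d := v1 - v2
        if d ≠ 0 then some (if d < 0 then (-1 : Int) else 1)
        else secondOrderCompareAltGo l1 l2 (i + 1)
      | _, _ => none
  else some 0                      -- fell off the loop: return 0
termination_by l1.length - i

def secondOrderCompare_alt (cardHand1 : String) (cardHand2 : String) : Int :=
  (secondOrderCompareAltGo cardHand1.toList cardHand2.toList 0).getD 0

-- ===== PRECONDITION & SPEC =====
-- positions j of both hands compare equal cards (both in CARD_VALUES, same value)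
def cardEqAt (l1 l2 : List Char) (j : Nat) : Prop :=
  (CARD_VALUES.get? (l1.getD j ' ')).isSome = true ∧
  CARD_VALUES.get? (l1.getD j ' ') = CARD_VALUES.get? (l2.getD j ' ')

-- position i of both hands holds valid cards of different value (A returns there)
def cardNeAt (l1 l2 : List Char) (i : Nat) : Prop :=
  (CARD_VALUES.get? (l1.getD i ' ')).isSome = true ∧
  (CARD_VALUES.get? (l2.getD i ' ')).isSome = true ∧
  CARD_VALUES.get? (l1.getD i ' ') ≠ CARD_VALUES.get? (l2.getD i ' ')

-- Pre_ is exactly A's return domain minus the empty cardHand1: either the whole of cardHand1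
-- compares equal against cardHand2 (needs cardHand2 at least as long), or some position i holds two
-- valid cards of different value after an all-equal prefix (A returns ±1 there without reading
-- further, so later cards need not be valid).  Excluded while A still "returns": only the empty
-- cardHand1, on which A falls off its loop and returns None instead of an int (B returns 0 there).
def Pre_secondOrderCompare (cardHand1 : String) (cardHand2 : String) : Prop :=
  cardHand1.toList ≠ [] ∧
  ((cardHand1.toList.length ≤ cardHand2.toList.length ∧
      ∀ j < cardHand1.toList.length, cardEqAt cardHand1.toList cardHand2.toList j) ∨
   (∃ i < cardHand1.toList.length, i < cardHand2.toList.length ∧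
      cardNeAt cardHand1.toList cardHand2.toList i ∧
      ∀ j < i, cardEqAt cardHand1.toList cardHand2.toList j))

instance (cardHand1 : String) (cardHand2 : String) : Decidable (Pre_secondOrderCompare cardHand1 cardHand2) := by
  unfold Pre_secondOrderCompare cardEqAt cardNeAt; infer_instance

def pvWitness_secondOrderCompare : String × String := ("KTJ", "KT2")

def Spec_secondOrderCompare (cardHand1 : String) (cardHand2 : String) (out : Int) : Prop := out = secondOrderCompare_alt cardHand1 cardHand2
instance (cardHand1 : String) (cardHand2 : String) (out : Int) : Decidable (Spec_secondOrderCompare cardHand1 cardHand2 out) := by unfold Spec_secondOrderCompare; infer_instance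

-- ===== CLAIM (what is proved, stated in full; the proofs are below) =====
def Claim_equal_secondOrderCompare : Prop := ∀ (cardHand1 : String) (cardHand2 : String), Dom_secondOrderCompare cardHand1 cardHand2 → Pre_secondOrderCompare cardHand1 cardHand2 → Spec_secondOrderCompare cardHand1 cardHand2 (secondOrderCompare cardHand1 cardHand2)

-- ===== LEMMAS AND PROOFS =====

-- B's loop started at i+1 on cons cells is B's loop started at i on the tails.
lemma altGo_shift_k (c1 c2 : Char) (t1 t2 : List Char) :
    ∀ (k i : Nat), t1.length - i ≤ k →
    secondOrderCompareAltGo (c1 :: t1) (c2 :: t2) (i + 1) = secondOrderCompareAltGo t1 t2 i := by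
  intro k
  induction k with
  | zero =>
    intro i h
    conv_lhs => rw [secondOrderCompareAltGo.eq_def]
    conv_rhs => rw [secondOrderCompareAltGo.eq_def]
    rw [dif_neg (by simp [List.length_cons]; omega : ¬ (i + 1 < (c1 :: t1).length)),
        dif_neg (by omega : ¬ (i < t1.length))]
  | succ k ih =>
    intro i h
    by_cases hi : i < t1.length
    · conv_lhs => rw [secondOrderCompareAltGo.eq_def]
      conv_rhs => rw [secondOrderCompareAltGo.eq_def]
      rw [dif_pos (by simp [List.length_cons]; omega : i + 1 < (c1 :: t1).length), dif_pos hi]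
      simp only [List.getElem?_cons_succ, List.getElem_cons_succ]
      rw [ih (i+1) (by omega)]
    · conv_lhs => rw [secondOrderCompareAltGo.eq_def]
      conv_rhs => rw [secondOrderCompareAltGo.eq_def]
      rw [dif_neg (by simp [List.length_cons]; omega : ¬ (i + 1 < (c1 :: t1).length)),
          dif_neg hi]

-- cardEqAt / cardNeAt on cons cells shift down with the index.
lemma cardEqAt_cons (a b : Char) (l1 l2 : List Char) (j : Nat) :
    cardEqAt (a :: l1) (b :: l2) (j + 1) ↔ cardEqAt l1 l2 j := by
  simp [cardEqAt, List.getD_cons_succ]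

lemma cardNeAt_cons (a b : Char) (l1 l2 : List Char) (i : Nat) :
    cardNeAt (a :: l1) (b :: l2) (i + 1) ↔ cardNeAt l1 l2 i := by
  simp [cardNeAt, List.getD_cons_succ]

-- A's recursion equals B's loop on the list level, under the precondition.
lemma aux_eq_altGo : ∀ (l1 l2 : List Char), l1 ≠ [] →
    ((l1.length ≤ l2.length ∧ ∀ j < l1.length, cardEqAt l1 l2 j) ∨
     (∃ i < l1.length, i < l2.length ∧ cardNeAt l1 l2 i ∧ ∀ j < i, cardEqAt l1 l2 j)) →
    secondOrderCompareAux l1 l2 = secondOrderCompareAltGo l1 l2 0 := by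
  intro l1
  induction l1 with
  | nil => intro l2 h; exact absurd rfl h
  | cons c1 t1 ih =>
    intro l2 _ hpre
    match l2 with
    | [] =>
      rcases hpre with ⟨hlen, _⟩ | ⟨i, _, hi2, _⟩
      · simp at hlen
      · simp at hi2
    | c2 :: t2 =>
      -- the head cards are both valid in every branch of Pre_
      have hv : ∃ v1 v2, CARD_VALUES.get? c1 = some v1 ∧ CARD_VALUES.get? c2 = some v2 := by
        rcases hpre with ⟨_, hall⟩ | ⟨i, hi1, hi2, hne, hpref⟩
        · have h0 := hall 0 (by simp)
          simp only [cardEqAt, List.getD_cons_zero] at h0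
          obtain ⟨v1, hv1⟩ := Option.isSome_iff_exists.mp h0.1
          exact ⟨v1, v1, hv1, h0.2 ▸ hv1⟩
        · match i with
          | 0 =>
            simp only [cardNeAt, List.getD_cons_zero] at hne
            obtain ⟨v1, hv1⟩ := Option.isSome_iff_exists.mp hne.1
            obtain ⟨v2, hv2⟩ := Option.isSome_iff_exists.mp hne.2.1
            exact ⟨v1, v2, hv1, hv2⟩
          | i' + 1 =>
            have h0 := hpref 0 (by omega)
            simp only [cardEqAt, List.getD_cons_zero] at h0
            obtain ⟨v1, hv1⟩ := Option.isSome_iff_exists.mp h0.1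
            exact ⟨v1, v1, hv1, h0.2 ▸ hv1⟩
      obtain ⟨v1, v2, hv1, hv2⟩ := hv
      rw [secondOrderCompareAux, secondOrderCompareAltGo]
      rw [dif_pos (by simp : (0:Nat) < (c1 :: t1).length)]
      simp only [List.getElem?_cons_zero, List.getElem_cons_zero, cardCompare, hv1, hv2]
      by_cases hvv : v1 = v2
      · subst hvv
        simp only [lt_irrefl, sub_self, ne_eq, not_true_eq_false, if_neg, not_false_eq_true]
        rw [altGo_shift_k c1 c2 t1 t2 t1.length 0 (by omega)]
        match t1 with
        | [] =>
          simp only [List.isEmpty_nil, if_true]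
          rw [secondOrderCompareAltGo]
          simp
        | d1 :: s1 =>
          simp only [List.isEmpty_cons]
          refine ih t2 (by simp) ?_
          rcases hpre with ⟨hlen, hall⟩ | ⟨i, hi1, hi2, hne, hpref⟩
          · exact Or.inl ⟨by simpa using hlen,
              fun j hj => (cardEqAt_cons c1 c2 _ t2 j).mp
                (hall (j+1) (by simp only [List.length_cons] at hj ⊢; omega))⟩
          · match i with
            | 0 =>
              simp only [cardNeAt, List.getD_cons_zero, hv1, hv2] at hne
              exact absurd rfl hne.2.2
            | i' + 1 =>
              exact Or.inr ⟨i', by simpa [Nat.succ_lt_succ_iff] using hi1,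
                by simpa [Nat.succ_lt_succ_iff] using hi2,
                (cardNeAt_cons c1 c2 _ t2 i').mp hne,
                fun j hj => (cardEqAt_cons c1 c2 _ t2 j).mp (hpref (j+1) (by omega))⟩
      · rcases lt_or_gt_of_ne hvv with hlt | hgt
        · simp [hlt, show v1 - v2 ≠ 0 by omega, show v1 - v2 < 0 by omega]
        · simp [show ¬ v1 < v2 by omega, show v2 < v1 from hgt,
                show v1 - v2 ≠ 0 by omega, show ¬ v1 - v2 < 0 by omega]

-- ===== VERDICT (by name: the statement is the Claim_ definition above) =====
theorem secondOrderCompare_spec : Claim_equal_secondOrderCompare := by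
  intro s1 s2 _ hpre
  obtain ⟨hne, hrest⟩ := hpre
  unfold Spec_secondOrderCompare secondOrderCompare secondOrderCompare_alt
  rw [aux_eq_altGo s1.toList s2.toList hne hrest]
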